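-- pv_equiv track=rewrite | github.com/serge1331/Sherlock_hub | api/app/src/sentiment_analyzer.py | sentiment_dispatcher
-- ===== SOURCE A (Python) =====
-- def sentiment_dispatcher(sentiments):
-- 	neg , pos =  0 , 0
--
-- 	for sentiment in sentiments:
-- 		if sentiment <= 0:
-- 			neg += sentiment
-- 		else:
-- 			pos += sentiment
--
-- 	yield neg
-- 	yield pos
-- ===== SOURCE B (Python) =====
-- def sentiment_dispatcher(sentiments):
--     sentiments = list(sentiments)
--     yield sum(s for s in sentiments if s <= 0)
--     yield sum(s for s in sentiments if s > 0)
-- ===== Notes on version B (the rewrite author's own statement) =====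
-- stated objective: alternative
-- what changed: Replaces the single classifying loop with two independent filtered sums (one over non-positive, one over positive elements) after materializing the input.
import Mathlib
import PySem

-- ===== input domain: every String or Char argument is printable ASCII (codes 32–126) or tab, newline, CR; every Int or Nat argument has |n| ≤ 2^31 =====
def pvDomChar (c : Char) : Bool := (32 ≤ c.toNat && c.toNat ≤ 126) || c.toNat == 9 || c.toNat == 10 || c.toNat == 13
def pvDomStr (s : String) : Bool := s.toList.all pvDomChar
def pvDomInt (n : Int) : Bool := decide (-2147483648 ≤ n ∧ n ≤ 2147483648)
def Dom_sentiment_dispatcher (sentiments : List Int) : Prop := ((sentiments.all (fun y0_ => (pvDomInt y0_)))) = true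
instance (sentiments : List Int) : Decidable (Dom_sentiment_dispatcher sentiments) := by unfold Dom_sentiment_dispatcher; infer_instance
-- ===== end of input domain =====

-- B replaces A's single classifying accumulator loop with two independent filtered sums (alternative decomposition, same cost).

-- ===== PORT A =====
-- A: one loop maintaining (neg, pos), then yields neg and pos (generator → list of its yields).
def sentiment_dispatcher (sentiments : List Int) : List Int :=
  let st := sentiments.foldl
    (fun (acc : Int × Int) sentiment =>
      if sentiment ≤ 0 then (acc.1 + sentiment, acc.2) else (acc.1, acc.2 + sentiment))
    (0, 0)
  [st.1, st.2]

-- ===== PORT B =====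
-- B: two separate filtered sums.
def sentiment_dispatcher_alt (sentiments : List Int) : List Int :=
  [((sentiments.filter (fun s => s ≤ 0)).sum),
   ((sentiments.filter (fun s => s > 0)).sum)]

-- ===== PRECONDITION & SPEC =====
def Spec_sentiment_dispatcher (sentiments : List Int) (out : List Int) : Prop := out = sentiment_dispatcher_alt sentiments
instance (sentiments : List Int) (out : List Int) : Decidable (Spec_sentiment_dispatcher sentiments out) := by unfold Spec_sentiment_dispatcher; infer_instance

-- ===== CLAIM (what is proved, stated in full; the proofs are below) =====
def Claim_equal_sentiment_dispatcher : Prop := ∀ (sentiments : List Int), Dom_sentiment_dispatcher sentiments → Spec_sentiment_dispatcher sentiments (sentiment_dispatcher sentiments)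

-- ===== LEMMAS AND PROOFS =====
theorem sd_foldl_inv (l : List Int) (a b : Int) :
    l.foldl (fun (acc : Int × Int) s =>
      if s ≤ 0 then (acc.1 + s, acc.2) else (acc.1, acc.2 + s)) (a, b)
    = (a + (l.filter (fun s => s ≤ 0)).sum, b + (l.filter (fun s => s > 0)).sum) := by
  induction l generalizing a b with
  | nil => simp
  | cons x xs ih =>
    simp only [List.foldl_cons, List.filter_cons]
    by_cases hx : x ≤ 0
    · have hx' : ¬ x > 0 := by omega
      simp [hx, hx', ih, add_assoc]
    · have hx' : x > 0 := by omega
      simp [hx, hx', ih, add_assoc]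

-- ===== VERDICT (by name: the statement is the Claim_ definition above) =====
theorem sentiment_dispatcher_spec : Claim_equal_sentiment_dispatcher := by
  intro sentiments _
  unfold Spec_sentiment_dispatcher sentiment_dispatcher sentiment_dispatcher_alt
  simp [sd_foldl_inv]
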